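-- pv_equiv track=rewrite | github.com/mattbroussard/advent-of-code-2021 | day12.py | has_any_small_dupe
-- ===== SOURCE A (Python) =====
-- def is_big(node):
--   return node == node.upper()
--
-- def has_any_small_dupe(path):
--   seen = set()
--
--   for n in path:
--     if is_big(n):
--       continue
--
--     if n in seen:
--       return True
--
--     seen.add(n)
--
--   return False
-- ===== SOURCE B (Python) =====
-- def is_big(node):
--   return node == node.upper()
--
-- def has_any_small_dupe(path):
--   smalls = [n for n in path if not is_big(n)]
--   return len(smalls) != len(set(smalls))
-- ===== Notes on version B (the rewrite author's own statement) =====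
-- stated objective: idiomatic
-- what changed: Replaces the incremental seen-set loop with early return by a tabulate-then-compare form: filter the small nodes in one pass, then detect duplicates by comparing the list's length with its set's length.
import Mathlib
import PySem

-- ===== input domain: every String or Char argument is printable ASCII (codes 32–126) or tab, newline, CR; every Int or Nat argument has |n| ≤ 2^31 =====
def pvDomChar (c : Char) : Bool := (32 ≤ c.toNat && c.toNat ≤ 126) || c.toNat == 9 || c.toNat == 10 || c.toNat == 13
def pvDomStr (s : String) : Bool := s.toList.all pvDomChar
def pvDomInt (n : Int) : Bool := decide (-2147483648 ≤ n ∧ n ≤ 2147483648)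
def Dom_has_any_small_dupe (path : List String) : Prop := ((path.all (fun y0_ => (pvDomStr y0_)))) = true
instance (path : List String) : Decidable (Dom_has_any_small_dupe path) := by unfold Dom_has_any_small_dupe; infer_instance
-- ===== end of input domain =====

-- B replaces A's incremental seen-set loop (early return) by a tabulate-then-compare form
-- (filter the small nodes, then compare list length with set length); same cost, more idiomatic.

-- ===== PORT A =====
-- helper shared by both Pythons (identical `is_big` in Source A and Source B)
def is_big (node : String) : Bool := node == PySem.Str.upper node

-- the `for n in path` loop with its early `return True`, state = the `seen` set
def dupeLoopA : List String → PySem.Set String → Bool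
  | [], _ => false
  | n :: rest, seen =>
    if is_big n then dupeLoopA rest seen
    else if PySem.Set.contains seen n then true
    else dupeLoopA rest (PySem.Set.add seen n)

def has_any_small_dupe (path : List String) : Bool :=
  dupeLoopA path PySem.Set.empty

-- ===== PORT B =====
def has_any_small_dupe_alt (path : List String) : Bool :=
  let smalls := path.filter (fun n => !is_big n)
  decide (smalls.length ≠ (PySem.Set.ofList smalls).length)

-- ===== PRECONDITION & SPEC =====
def Spec_has_any_small_dupe (path : List String) (out : Bool) : Prop := out = has_any_small_dupe_alt path
instance (path : List String) (out : Bool) : Decidable (Spec_has_any_small_dupe path out) := by unfold Spec_has_any_small_dupe; infer_instance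

-- ===== CLAIM (what is proved, stated in full; the proofs are below) =====
def Claim_equal_has_any_small_dupe : Prop := ∀ (path : List String), Dom_has_any_small_dupe path → Spec_has_any_small_dupe path (has_any_small_dupe path)

-- ===== LEMMAS AND PROOFS =====

-- set(xs) has as many elements as xs exactly when xs has no duplicates
theorem ofList_length_eq_iff {α : Type} [BEq α] [LawfulBEq α] (xs : List α) :
    (PySem.Set.ofList xs).length = xs.length ↔ xs.Nodup := by
  induction xs with
  | nil => simp [PySem.Set.ofList_nil]
  | cons x xs ih =>
    rw [PySem.Set.ofList_cons]
    constructor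
    · intro h
      have hle : (PySem.Set.discard (PySem.Set.ofList xs) x).length ≤ (PySem.Set.ofList xs).length :=
        List.length_filter_le _ _
      have hle2 := PySem.Set.length_ofList_le xs
      simp only [List.length_cons] at h
      have hlen : (PySem.Set.ofList xs).length = xs.length := by omega
      have hdisc : (PySem.Set.discard (PySem.Set.ofList xs) x).length = (PySem.Set.ofList xs).length := by
        omega
      have hx : x ∉ PySem.Set.ofList xs := by
        intro hmem
        have := (List.length_filter_eq_length_iff
          (l := (PySem.Set.ofList xs : List α)) (p := fun y => !y == x)).mp hdisc
        have := this x hmem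
        simp at this
      refine List.nodup_cons.mpr ⟨fun hx' => hx ((PySem.Set.mem_ofList _ _).mpr hx'), ih.mp hlen⟩
    · intro h
      rcases List.nodup_cons.mp h with ⟨hx, hnd⟩
      have : PySem.Set.ofList xs = xs := PySem.Set.ofList_eq_self_of_nodup xs hnd
      rw [this]
      have : PySem.Set.discard xs x = xs := by
        apply List.filter_eq_self.mpr
        intro y hy
        simp only [Bool.not_eq_eq_eq_not, Bool.not_true, beq_eq_false_iff_ne]
        exact fun he => hx (he ▸ hy)
      rw [this]

-- loop invariant: with a duplicate-free `seen`, A's loop reports a dupe exactly when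
-- seen ++ (small nodes of l) contains one
theorem dupeLoopA_eq (l seen : List String) (h : seen.Nodup) :
    dupeLoopA l seen = !decide ((seen ++ l.filter (fun n => !is_big n)).Nodup) := by
  induction l generalizing seen with
  | nil => simpa [dupeLoopA] using h
  | cons n rest ih =>
    by_cases hb : is_big n = true
    · simp [dupeLoopA, hb, ih seen h]
    · simp only [dupeLoopA, hb, if_false, List.filter_cons,
        Bool.not_eq_eq_eq_not, Bool.not_false]
      by_cases hm : n ∈ seen
      · have : PySem.Set.contains seen n = true := by
          simpa [PySem.Set.contains] using hm
        rw [this]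
        simp only [if_true]
        have : ¬ (seen ++ n :: rest.filter (fun n => !is_big n)).Nodup := by
          intro hnd
          rcases List.nodup_append.mp hnd with ⟨_, _, hdisj⟩
          exact hdisj n hm n (by simp) rfl
        simp [this]
      · have hc : PySem.Set.contains seen n = false := by
          simpa [PySem.Set.contains] using hm
        rw [hc]
        simp only [Bool.false_eq_true, if_false]
        rw [PySem.Set.add_of_not_mem hm]
        have hnd : (seen ++ [n]).Nodup := by
          simp only [List.nodup_append, List.nodup_cons, List.not_mem_nil, List.nodup_nil]
          exact ⟨h, by simp, fun a ha b hb2 => by simp at hb2; exact fun he => hm ((he.trans hb2) ▸ ha)⟩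
        rw [ih _ hnd]
        simp [List.append_assoc]

-- ===== VERDICT (by name: the statement is the Claim_ definition above) =====
theorem has_any_small_dupe_spec : Claim_equal_has_any_small_dupe := by
  intro path _
  unfold Spec_has_any_small_dupe has_any_small_dupe has_any_small_dupe_alt
  rw [dupeLoopA_eq path PySem.Set.empty (by simp [PySem.Set.empty])]
  have := ofList_length_eq_iff (path.filter (fun n => !is_big n))
  simp only [PySem.Set.empty, List.nil_append]
  by_cases hnd : (path.filter (fun n => !is_big n)).Nodup
  · simp [hnd, this.mpr hnd]
  · have : (PySem.Set.ofList (path.filter (fun n => !is_big n))).length ≠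
      (path.filter (fun n => !is_big n)).length := fun he => hnd (this.mp he)
    simp [hnd]
    omega
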